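-- pv_equiv track=rewrite | github.com/nic-obert/rusty-vm | src/assembler/token_to_byte_code.py | number_size
-- ===== SOURCE A (Python) =====
-- def number_size(number: int) -> int:
--     if number == 0:
--         return 1
--
--     size = 0
--     while number != 0:
--         number = number // 256
--         size += 1
--
--     return size
-- ===== SOURCE B (Python) =====
-- def number_size(number: int) -> int:
--     if number == 0:
--         return 1
--     return (number.bit_length() + 7) // 8
-- ===== Notes on version B (the rewrite author's own statement) =====
-- stated objective: idiomatic
-- what changed: Replaces the repeated floor-division-by-256 counting loop with the closed form (number.bit_length() + 7) // 8, keeping the 0 -> 1 special case.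
import Mathlib
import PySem

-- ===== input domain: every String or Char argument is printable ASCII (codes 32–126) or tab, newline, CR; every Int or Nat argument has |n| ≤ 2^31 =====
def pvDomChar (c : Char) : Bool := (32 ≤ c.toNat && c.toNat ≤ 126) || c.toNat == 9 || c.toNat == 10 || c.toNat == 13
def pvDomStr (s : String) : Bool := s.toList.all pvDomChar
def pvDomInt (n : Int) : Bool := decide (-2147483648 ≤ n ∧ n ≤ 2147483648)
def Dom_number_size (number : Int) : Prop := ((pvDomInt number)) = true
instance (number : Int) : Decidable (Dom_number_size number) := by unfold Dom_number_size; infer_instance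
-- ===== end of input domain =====

-- B replaces A's repeated //256 counting loop with the closed form (bit_length + 7) // 8 (idiomatic).

-- ===== PORT A =====
-- the while-loop of A; the 0 < number guard only makes the recursion total
-- (Python A never terminates on negative input, which Pre_ excludes)
def numberSizeLoop (number size : Int) : Int :=
  if number = 0 then size
  else if h : 0 < number then numberSizeLoop (PySem.Int.floordiv number 256) (size + 1)
  else size
termination_by number.natAbs
decreasing_by
  have h1 : PySem.Int.floordiv number 256 < number :=
    (PySem.Int.floordiv_lt_iff_lt_mul (by norm_num)).mpr (by nlinarith)
  have h2 : (0:Int) ≤ PySem.Int.floordiv number 256 :=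
    (PySem.Int.le_floordiv_iff_mul_le (by norm_num)).mpr (by omega)
  omega

def number_size (number : Int) : Int :=
  if number = 0 then 1 else numberSizeLoop number 0

-- ===== PORT B =====
def number_size_alt (number : Int) : Int :=
  if number = 0 then 1
  else PySem.Int.floordiv ((PySem.Int.bitLength number : Int) + 7) 8

-- ===== PRECONDITION & SPEC =====
-- Pre_ excludes negative inputs: on them Python A's while-loop never terminates (number // 256 stays -1).
def Pre_number_size (number : Int) : Prop := 0 ≤ number
instance (number : Int) : Decidable (Pre_number_size number) := by unfold Pre_number_size; infer_instance
def pvWitness_number_size : Int := (300)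

def Spec_number_size (number : Int) (out : Int) : Prop := out = number_size_alt number
instance (number : Int) (out : Int) : Decidable (Spec_number_size number out) := by unfold Spec_number_size; infer_instance

-- ===== CLAIM (what is proved, stated in full; the proofs are below) =====
def Claim_equal_number_size : Prop := ∀ (number : Int), Dom_number_size number → Pre_number_size number → Spec_number_size number (number_size number)

-- ===== LEMMAS AND PROOFS =====

theorem bitLength_pos (m : Nat) (hm : 0 < m) : 0 < PySem.Int.bitLength (m : Int) := by
  by_contra h
  have hb : PySem.Int.bitLength (m : Int) = 0 := by omega
  have := PySem.Int.lt_two_pow_bitLength (m : Int)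
  rw [hb] at this
  simp only [Int.natAbs_natCast, pow_zero] at this
  omega

theorem bitLength_lt_256 (m : Nat) (hm : 0 < m) (h : m < 256) :
    PySem.Int.bitLength (m : Int) ≤ 8 := by
  by_contra hc
  have hle := PySem.Int.two_pow_bitLength_le (m : Int) (Int.natCast_ne_zero.mpr hm.ne')
  simp only [Int.natAbs_natCast] at hle
  have hp : 2 ^ 8 ≤ 2 ^ (PySem.Int.bitLength (m : Int) - 1) :=
    Nat.pow_le_pow_right (by norm_num) (by omega)
  omega

theorem bitLength_div256 (m : Nat) (h : 256 ≤ m) :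
    PySem.Int.bitLength (m : Int) = PySem.Int.bitLength ((m / 256 : Nat) : Int) + 8 := by
  have e1 := PySem.Int.bitLength_natCast (m := m) (by omega)
  have e2 := PySem.Int.bitLength_natCast (m := m / 2) (by omega)
  have e3 := PySem.Int.bitLength_natCast (m := m / 2 / 2) (by omega)
  have e4 := PySem.Int.bitLength_natCast (m := m / 2 / 2 / 2) (by omega)
  have e5 := PySem.Int.bitLength_natCast (m := m / 2 / 2 / 2 / 2) (by omega)
  have e6 := PySem.Int.bitLength_natCast (m := m / 2 / 2 / 2 / 2 / 2) (by omega)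
  have e7 := PySem.Int.bitLength_natCast (m := m / 2 / 2 / 2 / 2 / 2 / 2) (by omega)
  have e8 := PySem.Int.bitLength_natCast (m := m / 2 / 2 / 2 / 2 / 2 / 2 / 2) (by omega)
  have hd : m / 2 / 2 / 2 / 2 / 2 / 2 / 2 / 2 = m / 256 := by omega
  rw [e1, e2, e3, e4, e5, e6, e7, e8, hd]

theorem loop_closed_form (m : Nat) (hm : 0 < m) : ∀ (size : Int),
    numberSizeLoop (m : Int) size = size + (((PySem.Int.bitLength (m : Int) + 7) / 8 : Nat) : Int) := by
  induction m using Nat.strong_induction_on with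
  | _ m ih =>
    intro size
    rw [numberSizeLoop]
    have hne : (m : Int) ≠ 0 := by exact_mod_cast hm.ne'
    rw [if_neg hne, dif_pos (by exact_mod_cast hm)]
    have hfd : PySem.Int.floordiv (m : Int) 256 = ((m / 256 : Nat) : Int) := by
      exact_mod_cast PySem.Int.floordiv_natCast m 256
    rw [hfd]
    by_cases h256 : m < 256
    · have hz : m / 256 = 0 := Nat.div_eq_of_lt h256
      rw [hz]
      rw [numberSizeLoop]
      simp only [Nat.cast_zero, if_true]
      have h1 := bitLength_pos m hm
      have h2 := bitLength_lt_256 m hm h256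
      have : (PySem.Int.bitLength (m : Int) + 7) / 8 = 1 := by omega
      rw [this]; push_cast; ring
    · have hq : 0 < m / 256 := Nat.div_pos (by omega) (by norm_num)
      rw [ih (m / 256) (Nat.div_lt_self hm (by norm_num)) hq (size + 1)]
      rw [bitLength_div256 m (by omega)]
      have : (PySem.Int.bitLength ((m / 256 : Nat) : Int) + 8 + 7) / 8
           = (PySem.Int.bitLength ((m / 256 : Nat) : Int) + 7) / 8 + 1 := by omega
      rw [this]; push_cast; ring

-- ===== VERDICT (by name: the statement is the Claim_ definition above) =====
theorem number_size_spec : Claim_equal_number_size := by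
  intro number _ hpre
  unfold Spec_number_size number_size number_size_alt
  by_cases h0 : number = 0
  · simp [h0]
  · rw [if_neg h0, if_neg h0]
    obtain ⟨m, rfl⟩ : ∃ m : Nat, number = (m : Int) :=
      ⟨number.toNat, (Int.toNat_of_nonneg hpre).symm⟩
    have hm : 0 < m := by
      by_contra h; exact h0 (by omega)
    rw [loop_closed_form m hm 0]
    rw [PySem.Int.floordiv_eq_ediv_of_pos (by norm_num : (0:Int) < 8)]
    omega
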